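-- pv_equiv track=rewrite | github.com/mhems/aoc | 2018/day25/a.py | remove_unreachable
-- ===== SOURCE A (Python) =====
-- def distance(v1: [int], v2: [int]) -> int:
--     return sum(abs(a - b) for a, b in zip(v1, v2))
--
-- def remove_unreachable(positions: {(int, int, int, int)}) -> {(int, int, int, int)}:
--     s = set()
--     for position in positions:
--         min_dist = 1e6
--         for pos2 in positions:
--             if position != pos2:
--                 d = distance(position, pos2)
--                 if d < min_dist:
--                     min_dist = d
--         if min_dist > 3:
--             s.add(tuple(position))
--     for p in s:
--         positions.remove(p)
--     return s
-- ===== SOURCE B (Python) =====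
-- def distance(v1, v2):
--     return sum(abs(a - b) for a, b in zip(v1, v2))
--
-- def remove_unreachable(positions):
--     # Return-value reimplementation: one pass over unordered index pairs with
--     # reachability flags (skipping pairs already both marked), instead of a full
--     # minimum-distance scan per point.  Does not mutate `positions` (A removes
--     # the returned points from it in place).
--     pts = list(positions)
--     n = len(pts)
--     reachable = [False] * n
--     for i in range(n):
--         for j in range(i + 1, n):
--             if reachable[i] and reachable[j]:
--                 continue
--             if pts[i] != pts[j] and distance(pts[i], pts[j]) <= 3:
--                 reachable[i] = True
--                 reachable[j] = True
--     return {tuple(p) for i, p in enumerate(pts) if not reachable[i]}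
-- ===== Notes on version B (the rewrite author's own statement) =====
-- stated objective: faster
-- what changed: B replaces A's per-point full minimum-distance scan (every ordered pair, keeping a running min) by a single pass over unordered index pairs that marks both endpoints reachable and skips any pair whose endpoints are both already marked; B returns the same set but does not repeat A's in-place removal of the returned points from the argument.
import Mathlib
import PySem

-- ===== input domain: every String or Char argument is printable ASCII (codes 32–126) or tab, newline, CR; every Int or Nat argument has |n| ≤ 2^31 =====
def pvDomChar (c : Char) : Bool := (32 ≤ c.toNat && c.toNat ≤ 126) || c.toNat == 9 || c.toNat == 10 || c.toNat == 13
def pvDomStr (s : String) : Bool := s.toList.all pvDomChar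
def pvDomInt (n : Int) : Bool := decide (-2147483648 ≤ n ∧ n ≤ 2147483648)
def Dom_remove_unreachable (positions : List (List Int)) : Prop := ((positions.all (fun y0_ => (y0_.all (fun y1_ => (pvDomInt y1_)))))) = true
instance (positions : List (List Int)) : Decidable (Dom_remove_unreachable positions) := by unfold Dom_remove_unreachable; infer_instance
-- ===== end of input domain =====

-- B replaces A's per-point minimum-distance scan by one pass over unordered index pairs with
-- reachability flags (objective: faster by a constant factor).  The equivalence is about the
-- RETURN value only: A also removes the returned points from its argument in place, B does not.

-- ===== PORT A =====
-- distance: sum(abs(a - b) for a, b in zip(v1, v2))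
def distance (v1 v2 : List Int) : Int :=
  (v1.zip v2).foldl (fun acc ab => acc + |ab.1 - ab.2|) 0

-- the inner-loop body of A: running minimum over pos2 ≠ position
def stepA (position : List Int) (min_dist : Int) (pos2 : List Int) : Int :=
  if position ≠ pos2 then
    let d := distance position pos2
    if d < min_dist then d else min_dist
  else min_dist

def remove_unreachable (positions : List (List Int)) : List (List Int) :=
  let s : PySem.Set (List Int) :=
    positions.foldl (fun s position =>
      -- min_dist starts at 1e6; its comparisons with ints are exact for the integer 1000000
      let min_dist : Int := positions.foldl (stepA position) 1000000
      if min_dist > 3 then PySem.Set.add s position else s) PySem.Set.empty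
  -- 'for p in s: positions.remove(p)' only mutates the caller's argument (it removes each
  -- returned point); the returned value is s.
  let _ := s.foldl (fun ps p => (PySem.List.remove? ps p).getD ps) positions
  s

-- ===== PORT B =====
-- body of B's pair loop: skip if both flagged, else flag both endpoints of a close distinct pair
def stepB (pts : List (List Int)) (i : Int) (r : List Bool) (j : Int) : List Bool :=
  if PySem.List.pyGetD r i false && PySem.List.pyGetD r j false then r
  else if PySem.List.pyGetD pts i [] ≠ PySem.List.pyGetD pts j [] ∧
          distance (PySem.List.pyGetD pts i []) (PySem.List.pyGetD pts j []) ≤ 3 then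
    PySem.List.pySetD (PySem.List.pySetD r i true) j true
  else r

-- for j in range(i + 1, n)
def innerB (pts : List (List Int)) (r : List Bool) (i : Int) : List Bool :=
  (PySem.List.pyRange (i + 1) (pts.length : Int)).foldl (stepB pts i) r

-- for i in range(n), starting from [False] * n
def outerB (pts : List (List Int)) : List Bool :=
  (PySem.List.pyRange 0 (pts.length : Int)).foldl (innerB pts) (List.replicate pts.length false)

def remove_unreachable_alt (positions : List (List Int)) : List (List Int) :=
  let reachable := outerB positions
  (PySem.List.enumerate positions 0).foldl
    (fun s ip => if PySem.List.pyGetD reachable ip.1 false then s else PySem.Set.add s ip.2)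
    PySem.Set.empty

-- ===== PRECONDITION & SPEC =====
def Spec_remove_unreachable (positions : List (List Int)) (out : List (List Int)) : Prop := out = remove_unreachable_alt positions
instance (positions : List (List Int)) (out : List (List Int)) : Decidable (Spec_remove_unreachable positions out) := by unfold Spec_remove_unreachable; infer_instance

-- ===== CLAIM (what is proved, stated in full; the proofs are below) =====
def Claim_equal_remove_unreachable : Prop := ∀ (positions : List (List Int)), Dom_remove_unreachable positions → Spec_remove_unreachable positions (remove_unreachable positions)

-- ===== LEMMAS AND PROOFS =====

-- the common characterisation both ports are reduced to: p is kept iff every other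
-- distinct point of the list is strictly farther than 3
abbrev isolated (positions : List (List Int)) (p : List Int) : Prop :=
  ∀ q ∈ positions, q ≠ p → 3 < distance p q

def isoFold (positions : List (List Int)) : PySem.Set (List Int) :=
  positions.foldl (fun s p => if isolated positions p then PySem.Set.add s p else s)
    PySem.Set.empty

-- A side ------------------------------------------------------------------

lemma stepA_le (p : List Int) (m : Int) (q : List Int) : stepA p m q ≤ m := by
  unfold stepA; dsimp only; split_ifs <;> omega

lemma foldA_le (p : List Int) (qs : List (List Int)) (m : Int) :
    qs.foldl (stepA p) m ≤ m := by
  induction qs generalizing m with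
  | nil => simp
  | cons q qs ih => exact le_trans (ih (stepA p m q)) (stepA_le p m q)

lemma foldA_le_of_mem (p : List Int) (qs : List (List Int)) (q : List Int)
    (hne : p ≠ q) : ∀ (_hq : q ∈ qs) (m : Int), qs.foldl (stepA p) m ≤ distance p q := by
  induction qs with
  | nil => intro hq; simp at hq
  | cons x xs ih =>
    intro hq m
    rcases List.mem_cons.mp hq with h | h
    · subst h
      refine le_trans (foldA_le p xs (stepA p m q)) ?_
      unfold stepA; rw [if_pos hne]; dsimp only; split_ifs <;> omega
    · exact ih h (stepA p m x)

lemma foldA_gt (p : List Int) (qs : List (List Int))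
    (h : ∀ q ∈ qs, p ≠ q → 3 < distance p q) :
    ∀ m : Int, 3 < m → 3 < qs.foldl (stepA p) m := by
  induction qs with
  | nil => intro m hm; exact hm
  | cons x xs ih =>
    intro m hm
    refine ih (fun q hq => h q (List.mem_cons_of_mem x hq)) (stepA p m x) ?_
    unfold stepA; dsimp only; split_ifs with h1 h2
    · have := h x List.mem_cons_self h1; omega
    · exact hm
    · exact hm

lemma foldA_iff (positions : List (List Int)) (p : List Int) :
    3 < positions.foldl (stepA p) 1000000 ↔ isolated positions p := by
  constructor
  · intro hgt q hq hne
    by_contra hle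
    have : positions.foldl (stepA p) 1000000 ≤ distance p q :=
      foldA_le_of_mem p positions q (Ne.symm hne) hq 1000000
    omega
  · intro hiso
    exact foldA_gt p positions (fun q hq hpq => hiso q hq (Ne.symm hpq)) 1000000 (by omega)

lemma portA_eq (positions : List (List Int)) :
    remove_unreachable positions = isoFold positions := by
  unfold remove_unreachable isoFold
  refine PySem.List.foldl_congr_mem positions _ _ PySem.Set.empty ?_
  intro s p _
  show (if positions.foldl (stepA p) 1000000 > 3 then PySem.Set.add s p else s)
      = (if isolated positions p then PySem.Set.add s p else s)
  by_cases hiso : isolated positions p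
  · rw [if_pos ((foldA_iff positions p).mpr hiso), if_pos hiso]
  · rw [if_neg (fun hgt => hiso ((foldA_iff positions p).mp hgt)), if_neg hiso]

-- distance is symmetric ----------------------------------------------------

lemma distance_comm (v w : List Int) : distance v w = distance w v := by
  unfold distance
  rw [← List.zip_swap w v, List.foldl_map]
  exact PySem.List.foldl_congr_mem _ _ _ _ (fun acc x _ => by simp [abs_sub_comm])

-- B side: the flag list ----------------------------------------------------

def flag (r : List Bool) (k : Int) : Prop := PySem.List.pyGetD r k false = true

lemma getD_set_true_self (r : List Bool) (a : Nat) (ha : a < r.length) :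
    (r.set a true).getD a false = true := by
  simp [List.getD, List.getElem?_set_self ha]

lemma getD_set_ne (r : List Bool) (a b : Nat) (v : Bool) (hab : a ≠ b) :
    (r.set b v).getD a false = r.getD a false := by
  simp [List.getD, List.getElem?_set_ne (Ne.symm hab)]

lemma getD_set_mono (r : List Bool) (a b : Nat) (h : r.getD a false = true) :
    (r.set b true).getD a false = true := by
  by_cases hab : a = b
  · subst hab
    by_cases hb : a < r.length
    · exact getD_set_true_self r a hb
    · rw [List.set_eq_of_length_le (by omega)]; exact h
  · rw [getD_set_ne r a b true hab]; exact h

lemma flag_set (r : List Bool) (b k : Int) (hb : 0 ≤ b) (hk : 0 ≤ k)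
    (h : flag r k) : flag (PySem.List.pySetD r b true) k := by
  unfold flag at *
  rw [PySem.List.pySetD_of_nonneg r true hb, PySem.List.pyGetD_of_nonneg _ _ hk] at *
  exact getD_set_mono r k.toNat b.toNat h

lemma stepB_mono (pts : List (List Int)) (i : Int) (r : List Bool) (j k : Int)
    (hi : 0 ≤ i) (hj : 0 ≤ j) (hk : 0 ≤ k) (h : flag r k) : flag (stepB pts i r j) k := by
  unfold stepB; split_ifs with h1 h2
  · exact h
  · exact flag_set _ j k hj hk (flag_set _ i k hi hk h)
  · exact h

-- a fold preserves any invariant its step preserves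
lemma foldl_inv {α β : Type} (P : β → Prop) (f : β → α → β) (l : List α) (r : β)
    (hm : ∀ r x, x ∈ l → P r → P (f r x)) (h : P r) : P (l.foldl f r) := by
  induction l generalizing r with
  | nil => exact h
  | cons x xs ih =>
    exact ih (f r x) (fun r y hy => hm r y (List.mem_cons_of_mem x hy))
      (hm r x List.mem_cons_self h)

lemma innerB_mono (pts : List (List Int)) (r : List Bool) (i k : Int)
    (hi : 0 ≤ i) (hk : 0 ≤ k) (h : flag r k) : flag (innerB pts r i) k := by
  unfold innerB
  refine foldl_inv (fun r => flag r k) _ _ r (fun r j hj hf => ?_) h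
  exact stepB_mono pts i r j k hi (by have := (PySem.List.mem_pyRange_one.mp hj).1; omega) hk hf

-- lengths are preserved ----------------------------------------------------

lemma foldl_length {α : Type} (f : List Bool → α → List Bool) (l : List α) (r : List Bool)
    (hf : ∀ r x, x ∈ l → (f r x).length = r.length) : (l.foldl f r).length = r.length := by
  induction l generalizing r with
  | nil => rfl
  | cons x xs ih =>
    rw [List.foldl_cons, ih (f r x) (fun r y hy => hf r y (List.mem_cons_of_mem x hy)),
      hf r x List.mem_cons_self]

lemma length_stepB (pts : List (List Int)) (i : Int) (r : List Bool) (j : Int) :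
    (stepB pts i r j).length = r.length := by
  unfold stepB; split_ifs <;> simp [PySem.List.length_pySetD]

lemma length_innerB (pts : List (List Int)) (r : List Bool) (i : Int) :
    (innerB pts r i).length = r.length :=
  foldl_length _ _ r (fun r j _ => length_stepB pts i r j)

-- completeness: the pair (a, b) really gets marked --------------------------

lemma stepB_marks (pts : List (List Int)) (a : Int) (r : List Bool) (b : Int)
    (ha : 0 ≤ a) (hab : a < b) (hb : b < (r.length : Int))
    (hC : PySem.List.pyGetD pts a [] ≠ PySem.List.pyGetD pts b [] ∧
          distance (PySem.List.pyGetD pts a []) (PySem.List.pyGetD pts b []) ≤ 3) :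
    flag (stepB pts a r b) a ∧ flag (stepB pts a r b) b := by
  unfold stepB flag
  split_ifs with h1
  · constructor
    · exact (Bool.and_eq_true_iff.mp h1).1
    · exact (Bool.and_eq_true_iff.mp h1).2
  · have ha' : 0 ≤ b := by omega
    rw [PySem.List.pySetD_of_nonneg _ true ha, PySem.List.pySetD_of_nonneg _ true ha',
        PySem.List.pyGetD_of_nonneg _ _ ha, PySem.List.pyGetD_of_nonneg _ _ ha']
    have hblen : b.toNat < (r.set a.toNat true).length := by
      simp only [List.length_set]; omega
    have hab' : a.toNat ≠ b.toNat := by omega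
    constructor
    · rw [getD_set_ne _ a.toNat b.toNat true hab']
      exact getD_set_true_self r a.toNat (by omega)
    · exact getD_set_true_self _ b.toNat hblen

lemma innerB_marks (pts : List (List Int)) (r : List Bool) (a b : Int)
    (ha : 0 ≤ a) (hab : a < b) (hb : b < (r.length : Int))
    (hC : PySem.List.pyGetD pts a [] ≠ PySem.List.pyGetD pts b [] ∧
          distance (PySem.List.pyGetD pts a []) (PySem.List.pyGetD pts b []) ≤ 3)
    (hlen : (r.length : Int) = (pts.length : Int)) :
    flag (innerB pts r a) a ∧ flag (innerB pts r a) b := by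
  unfold innerB
  rw [PySem.List.pyRange_one_append (a+1) b (pts.length : Int) (by omega) (by omega),
      List.foldl_append, PySem.List.pyRange_one_cons (show b < (pts.length : Int) by omega),
      List.foldl_cons]
  set r2 := (PySem.List.pyRange (a+1) b).foldl (stepB pts a) r with hr2
  have hlen2 : (r2.length : Int) = (r.length : Int) := by
    rw [hr2, foldl_length _ _ r (fun r j _ => length_stepB pts a r j)]
  have hmarks := stepB_marks pts a r2 b ha hab (by omega) hC
  constructor <;>
    exact foldl_inv (fun r => flag r _) _ _ _
      (fun r j hj hf => stepB_mono pts a r j _ ha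
        (by have := (PySem.List.mem_pyRange_one.mp hj).1; omega) (by omega) hf)
      (by first | exact hmarks.1 | exact hmarks.2)

lemma outerB_marks (pts : List (List Int)) (a b : Int)
    (ha : 0 ≤ a) (hab : a < b) (hb : b < (pts.length : Int))
    (hC : PySem.List.pyGetD pts a [] ≠ PySem.List.pyGetD pts b [] ∧
          distance (PySem.List.pyGetD pts a []) (PySem.List.pyGetD pts b []) ≤ 3) :
    flag (outerB pts) a ∧ flag (outerB pts) b := by
  unfold outerB
  rw [PySem.List.pyRange_one_append 0 a (pts.length : Int) ha (by omega),
      List.foldl_append, PySem.List.pyRange_one_cons (show a < (pts.length : Int) by omega),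
      List.foldl_cons]
  set r1 := (PySem.List.pyRange 0 a).foldl (innerB pts) (List.replicate pts.length false) with hr1
  have hlen1 : (r1.length : Int) = (pts.length : Int) := by
    rw [hr1, foldl_length _ _ _ (fun r i _ => length_innerB pts r i)]
    simp
  have hmarks := innerB_marks pts r1 a b ha hab (by omega) hC hlen1
  constructor <;>
    exact foldl_inv (fun r => flag r _) _ _ _
      (fun r i hi hf => innerB_mono pts r i _
        (by have := (PySem.List.mem_pyRange_one.mp hi).1; omega) (by omega) hf)
      (by first | exact hmarks.1 | exact hmarks.2)

lemma pyGetD_at_nat (positions : List (List Int)) (j : Nat) (hj : j < positions.length) :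
    PySem.List.pyGetD positions (j : Int) [] = positions[j] := by
  rw [PySem.List.pyGetD_of_nonneg _ _ (by positivity)]
  simp [List.getD, List.getElem?_eq_getElem hj]

-- soundness: a set flag records a genuine close distinct pair ---------------

def reachSound (pts : List (List Int)) (r : List Bool) : Prop :=
  ∀ k : Int, 0 ≤ k → flag r k →
    ∃ j : Int, 0 ≤ j ∧ j < (pts.length : Int) ∧ j ≠ k ∧
      PySem.List.pyGetD pts j [] ≠ PySem.List.pyGetD pts k [] ∧
      distance (PySem.List.pyGetD pts k []) (PySem.List.pyGetD pts j []) ≤ 3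

lemma flag_stepB_cases (pts : List (List Int)) (i : Int) (r : List Bool) (j k : Int)
    (hi : 0 ≤ i) (hj : 0 ≤ j) (hk : 0 ≤ k) (hf : flag (stepB pts i r j) k) :
    flag r k ∨ ((k = i ∨ k = j) ∧
      PySem.List.pyGetD pts i [] ≠ PySem.List.pyGetD pts j [] ∧
      distance (PySem.List.pyGetD pts i []) (PySem.List.pyGetD pts j []) ≤ 3) := by
  unfold stepB at hf
  split_ifs at hf with h1 h2
  · exact Or.inl hf
  · by_cases hki : k = i
    · exact Or.inr ⟨Or.inl hki, h2⟩
    · by_cases hkj : k = j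
      · exact Or.inr ⟨Or.inr hkj, h2⟩
      · left
        unfold flag at hf ⊢
        rw [PySem.List.pySetD_of_nonneg _ true hi, PySem.List.pySetD_of_nonneg _ true hj,
            PySem.List.pyGetD_of_nonneg _ _ hk] at hf
        rw [PySem.List.pyGetD_of_nonneg _ _ hk]
        rw [getD_set_ne _ k.toNat j.toNat true (by omega),
            getD_set_ne _ k.toNat i.toNat true (by omega)] at hf
        exact hf
  · exact Or.inl hf

lemma stepB_sound (pts : List (List Int)) (i : Int) (r : List Bool) (j : Int)
    (hi : 0 ≤ i) (hij : i < j) (hjn : j < (pts.length : Int))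
    (h : reachSound pts r) : reachSound pts (stepB pts i r j) := by
  intro k hk hf
  rcases flag_stepB_cases pts i r j k hi (by omega) hk hf with hold | ⟨hki, hne, hd⟩
  · exact h k hk hold
  · rcases hki with rfl | rfl
    · exact ⟨j, by omega, hjn, by omega, Ne.symm hne, hd⟩
    · exact ⟨i, hi, by omega, by omega, hne, by rw [distance_comm]; exact hd⟩

lemma flag_replicate (n : Nat) (k : Int) (hk : 0 ≤ k) :
    ¬ flag (List.replicate n false) k := by
  unfold flag
  rw [PySem.List.pyGetD_of_nonneg _ _ hk]
  simp [List.getD]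

lemma outerB_sound (pts : List (List Int)) : reachSound pts (outerB pts) := by
  unfold outerB
  refine foldl_inv (reachSound pts) _ _ _ (fun r i hi hs => ?_) ?_
  · have hi' := PySem.List.mem_pyRange_one.mp hi
    unfold innerB
    refine foldl_inv (reachSound pts) _ _ _ (fun r j hj hs' => ?_) hs
    have hj' := PySem.List.mem_pyRange_one.mp hj
    exact stepB_sound pts i r j (by omega) (by omega) (by omega) hs'
  · intro k hk hf
    exact absurd hf (flag_replicate pts.length k hk)

-- the flag characterisation ------------------------------------------------

lemma outerB_flag_iff (positions : List (List Int)) (k : Nat) (hk : k < positions.length) :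
    flag (outerB positions) (k : Int) ↔
      ∃ q ∈ positions, q ≠ positions[k] ∧ distance positions[k] q ≤ 3 := by
  constructor
  · intro hf
    obtain ⟨j, hj0, hjn, _hjk, hne, hd⟩ := outerB_sound positions (k : Int) (by positivity) hf
    obtain ⟨jn, rfl⟩ : ∃ jn : Nat, j = (jn : Int) := ⟨j.toNat, by omega⟩
    have hjlt : jn < positions.length := by omega
    have hjeq := pyGetD_at_nat positions jn hjlt
    refine ⟨positions[jn], List.getElem_mem hjlt, ?_, ?_⟩
    · rw [← hjeq, ← pyGetD_at_nat positions k hk]; exact hne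
    · rw [← hjeq, ← pyGetD_at_nat positions k hk]; exact hd
  · rintro ⟨q, hq, hne, hd⟩
    obtain ⟨m, hm, hqm⟩ := List.mem_iff_getElem.mp hq
    have hmk : m ≠ k := fun hc => hne (by subst hc; rw [hqm])
    rcases Nat.lt_or_ge m k with hlt | hge
    · exact (outerB_marks positions m k (by positivity) (by omega) (by omega)
        ⟨by rw [pyGetD_at_nat positions m hm, pyGetD_at_nat positions k hk, hqm]; exact hne,
         by rw [pyGetD_at_nat positions m hm, pyGetD_at_nat positions k hk, hqm,
                distance_comm]; exact hd⟩).2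
    · have hkm : (k : Int) < (m : Int) := by omega
      exact (outerB_marks positions k m (by positivity) hkm (by omega)
        ⟨by rw [pyGetD_at_nat positions m hm, pyGetD_at_nat positions k hk, hqm];
            exact fun hc => hne hc.symm,
         by rw [pyGetD_at_nat positions m hm, pyGetD_at_nat positions k hk, hqm]; exact hd⟩).1

lemma foldl_enumerate_snd {α β : Type} (xs : List α) (f : β → α → β) (init : β) :
    (PySem.List.enumerate xs 0).foldl (fun s ip => f s ip.2) init = xs.foldl f init := by
  conv_rhs => rw [← PySem.List.map_snd_enumerate xs 0]
  rw [List.foldl_map]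

lemma portB_eq (positions : List (List Int)) :
    remove_unreachable_alt positions = isoFold positions := by
  unfold remove_unreachable_alt isoFold
  rw [← foldl_enumerate_snd positions
        (fun s p => if isolated positions p then PySem.Set.add s p else s) PySem.Set.empty]
  refine PySem.List.foldl_congr_mem _ _ _ PySem.Set.empty ?_
  intro s ip hip
  obtain ⟨k, hk, rfl⟩ := (PySem.List.mem_enumerate_iff positions 0 ip).mp hip
  show (if PySem.List.pyGetD (outerB positions) (0 + (k : Int), positions[k]).1 false
        then s else PySem.Set.add s (0 + (k : Int), positions[k]).2)
      = (if isolated positions ((0 + (k : Int), positions[k]).2)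
        then PySem.Set.add s ((0 + (k : Int), positions[k]).2) else s)
  simp only [zero_add]
  by_cases hiso : isolated positions positions[k]
  · have hnf : ¬ flag (outerB positions) (k : Int) := fun hf => by
      obtain ⟨q, hq, hne, hd⟩ := (outerB_flag_iff positions k hk).mp hf
      exact absurd (hiso q hq hne) (by omega)
    rw [if_neg (by unfold flag at hnf; simpa using hnf), if_pos hiso]
  · have hf : flag (outerB positions) (k : Int) := by
      refine (outerB_flag_iff positions k hk).mpr ?_
      by_contra hc
      exact hiso (fun q hq hne => by
        by_contra h3
        exact hc ⟨q, hq, hne, by omega⟩)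
    rw [if_pos (by unfold flag at hf; simpa using hf), if_neg hiso]

-- ===== VERDICT (by name: the statement is the Claim_ definition above) =====
theorem remove_unreachable_spec : Claim_equal_remove_unreachable := by
  intro positions _
  unfold Spec_remove_unreachable
  rw [portA_eq positions, portB_eq positions]
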